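-- pv_equiv track=rewrite | github.com/docxology/MetaInformAnt | src/metainformant/longread/methylation/calling.py | _segment_cpgs
-- ===== SOURCE A (Python) =====
-- def _segment_cpgs(
--     positions: list[tuple[str, int]],
--     max_distance: int,
-- ) -> list[list[tuple[str, int]]]:
--     """Segment sorted CpG positions into contiguous regions.
--
--     Consecutive CpGs on the same chromosome within ``max_distance`` are
--     grouped into the same region.
--
--     Args:
--         positions: Sorted list of (chrom, position) tuples.
--         max_distance: Maximum gap between consecutive CpGs in the same region.
--
--     Returns:
--         List of regions, each a list of (chrom, position) tuples.
--     """
--     if not positions: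
--         return []
--
--     regions: list[list[tuple[str, int]]] = [[positions[0]]]
--
--     for i in range(1, len(positions)):
--         prev_chrom, prev_pos = positions[i - 1]
--         curr_chrom, curr_pos = positions[i]
--
--         if curr_chrom == prev_chrom and (curr_pos - prev_pos) <= max_distance:
--             regions[-1].append(positions[i])
--         else:
--             regions.append([positions[i]])
--
--     return regions
-- ===== SOURCE B (Python) =====
-- def _segment_cpgs(
--     positions: list[tuple[str, int]],
--     max_distance: int,
-- ) -> list[list[tuple[str, int]]]:
--     """Boundary-detection then slicing: find the indices where a new region
--     starts, then cut the list at those boundaries."""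
--     if not positions:
--         return []
--
--     cuts = [0]
--     for i in range(1, len(positions)):
--         prev_chrom, prev_pos = positions[i - 1]
--         curr_chrom, curr_pos = positions[i]
--         if curr_chrom != prev_chrom or curr_pos - prev_pos > max_distance:
--             cuts.append(i)
--     cuts.append(len(positions))
--
--     return [positions[cuts[j]:cuts[j + 1]] for j in range(len(cuts) - 1)]
-- ===== Notes on version B (the rewrite author's own statement) =====
-- stated objective: alternative
-- what changed: Replaces the incremental append-to-last-region accumulator with two differently-shaped passes: a boundary-index pass collecting cut points, then a slicing pass that builds each region as positions[cuts[j]:cuts[j+1]].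
import Mathlib
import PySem

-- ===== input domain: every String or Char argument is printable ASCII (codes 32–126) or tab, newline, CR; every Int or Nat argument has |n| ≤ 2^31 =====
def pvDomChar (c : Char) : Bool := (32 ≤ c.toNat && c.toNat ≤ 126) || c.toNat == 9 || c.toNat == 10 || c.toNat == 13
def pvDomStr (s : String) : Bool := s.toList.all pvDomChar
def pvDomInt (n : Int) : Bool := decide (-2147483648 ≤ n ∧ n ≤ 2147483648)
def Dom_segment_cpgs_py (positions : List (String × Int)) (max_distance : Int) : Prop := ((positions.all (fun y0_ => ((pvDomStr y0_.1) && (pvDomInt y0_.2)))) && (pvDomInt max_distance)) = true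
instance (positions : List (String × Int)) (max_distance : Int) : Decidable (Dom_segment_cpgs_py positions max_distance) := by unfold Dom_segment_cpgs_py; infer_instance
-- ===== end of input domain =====

-- B replaces A's incremental append-to-last-region loop by two passes: collect the
-- boundary indices where a new region starts, then slice the list at those boundaries
-- (objective: alternative decomposition, same O(n)).

-- ===== PORT A =====
-- the body of A's `for i in range(1, len(positions))` loop
def stepA_segment (positions : List (String × Int)) (max_distance : Int)
    (regions : List (List (String × Int))) (i : Int) : List (List (String × Int)) :=
  let prev := PySem.List.pyGetD positions (i - 1) ("", 0)
  let curr := PySem.List.pyGetD positions i ("", 0)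
  if curr.1 = prev.1 ∧ curr.2 - prev.2 ≤ max_distance then
    regions.dropLast ++ [PySem.List.pyGetD regions (-1) [] ++ [curr]]
  else
    regions ++ [[curr]]

def segment_cpgs_py (positions : List (String × Int)) (max_distance : Int) : List (List (String × Int)) :=
  if positions = [] then []
  else
    (PySem.List.pyRange 1 (positions.length : Int)).foldl
      (stepA_segment positions max_distance)
      [[PySem.List.pyGetD positions 0 ("", 0)]]

-- ===== PORT B =====
-- the body of B's boundary-collecting loop
def stepB_segment (positions : List (String × Int)) (max_distance : Int)
    (cuts : List Int) (i : Int) : List Int :=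
  let prev := PySem.List.pyGetD positions (i - 1) ("", 0)
  let curr := PySem.List.pyGetD positions i ("", 0)
  if curr.1 ≠ prev.1 ∨ max_distance < curr.2 - prev.2 then cuts ++ [i] else cuts

def segment_cpgs_py_alt (positions : List (String × Int)) (max_distance : Int) : List (List (String × Int)) :=
  if positions = [] then []
  else
    let cuts : List Int :=
      ((PySem.List.pyRange 1 (positions.length : Int)).foldl
        (stepB_segment positions max_distance) [0]) ++ [(positions.length : Int)]
    (PySem.List.pyRange 0 ((cuts.length : Int) - 1)).map
      (fun j => PySem.List.slice positions (some (PySem.List.pyGetD cuts j 0))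
                                           (some (PySem.List.pyGetD cuts (j + 1) 0)))

-- ===== PRECONDITION & SPEC =====
def Spec_segment_cpgs_py (positions : List (String × Int)) (max_distance : Int) (out : List (List (String × Int))) : Prop := out = segment_cpgs_py_alt positions max_distance
instance (positions : List (String × Int)) (max_distance : Int) (out : List (List (String × Int))) : Decidable (Spec_segment_cpgs_py positions max_distance out) := by unfold Spec_segment_cpgs_py; infer_instance

-- ===== CLAIM (what is proved, stated in full; the proofs are below) =====
def Claim_equal_segment_cpgs_py : Prop := ∀ (positions : List (String × Int)) (max_distance : Int), Dom_segment_cpgs_py positions max_distance → Spec_segment_cpgs_py positions max_distance (segment_cpgs_py positions max_distance)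

-- ===== LEMMAS AND PROOFS =====

-- the regions determined by a list of cut indices: one slice per adjacent pair
def mkSlices (P : List (String × Int)) : List Int → List (List (String × Int))
  | a :: b :: rest => PySem.List.slice P (some a) (some b) :: mkSlices P (b :: rest)
  | _ => []

-- appending a closing cut adds one slice from the previous last cut
theorem mkSlices_append (P : List (String × Int)) (cuts : List Int) (h : cuts ≠ []) (t : Int) :
    mkSlices P (cuts ++ [t]) = mkSlices P cuts ++ [PySem.List.slice P (some (cuts.getLast h)) (some t)] := by
  induction cuts with
  | nil => exact absurd rfl h
  | cons a tl ih =>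
    cases tl with
    | nil => simp [mkSlices]
    | cons b rest =>
      have hih := ih (by simp)
      show PySem.List.slice P (some a) (some b) :: mkSlices P ((b :: rest) ++ [t])
          = mkSlices P (a :: b :: rest) ++ [PySem.List.slice P (some ((a :: b :: rest).getLast (by simp))) (some t)]
      rw [hih]
      simp [mkSlices, List.getLast_cons]

-- extending a slice by one element on the right
theorem slice_succ_right (P : List (String × Int)) (a b : Nat) (hab : a ≤ b) (hb : b < P.length) :
    PySem.List.slice P (some (a : Int)) (some ((b + 1 : Nat) : Int))
      = PySem.List.slice P (some (a : Int)) (some (b : Int)) ++ [P[b]] := by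
  rw [PySem.List.slice_natCast, PySem.List.slice_natCast]
  have h1 : b + 1 - a = (b - a) + 1 := by omega
  rw [h1, List.take_add_one]
  have h2 : (P.drop a)[b - a]? = some P[b] := by
    rw [List.getElem?_drop]
    have h3 : a + (b - a) = b := by omega
    rw [h3, List.getElem?_eq_getElem hb]
  simp [h2]

theorem slice_singleton (P : List (String × Int)) (b : Nat) (hb : b < P.length) :
    PySem.List.slice P (some (b : Int)) (some ((b + 1 : Nat) : Int)) = [P[b]] := by
  rw [PySem.List.slice_natCast]
  have h1 : b + 1 - b = 0 + 1 := by omega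
  rw [h1, List.take_add_one]
  have h2 : (P.drop b)[0]? = some P[b] := by
    rw [List.getElem?_drop]
    simp [List.getElem?_eq_getElem hb]
  simp [h2]

-- the loop invariant: after processing indices 1..k, A's regions are exactly the
-- slices determined by B's cut indices so far, closed at k+1
theorem segment_inv (P : List (String × Int)) (md : Int) (hP : P ≠ []) (k : Nat)
    (hk : k < P.length) :
    (PySem.List.pyRange 1 (1 + (k : Int))).foldl (stepA_segment P md) [[PySem.List.pyGetD P 0 ("", 0)]]
      = mkSlices P (((PySem.List.pyRange 1 (1 + (k : Int))).foldl (stepB_segment P md) [0]) ++ [((k : Int) + 1)])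
    ∧ ((PySem.List.pyRange 1 (1 + (k : Int))).foldl (stepB_segment P md) [0]) ≠ []
    ∧ (∀ x ∈ (PySem.List.pyRange 1 (1 + (k : Int))).foldl (stepB_segment P md) [0], 0 ≤ x ∧ x ≤ (k : Int)) := by
  induction k with
  | zero =>
    have hr : PySem.List.pyRange 1 (1 + ((0 : Nat) : Int)) = [] := by
      norm_num [PySem.List.pyRange_one]
    obtain ⟨hd, tl, rfl⟩ := List.exists_cons_of_ne_nil hP
    rw [hr]
    refine ⟨?_, by simp, by simp⟩
    simp only [List.foldl_nil, Nat.cast_zero, zero_add]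
    have h01 : PySem.List.slice (hd :: tl) (some (0 : Int)) (some (1 : Int)) = [hd] := by
      have h := PySem.List.slice_natCast (hd :: tl) 0 1
      simpa using h
    simp [mkSlices, h01, PySem.List.pyGetD_zero_cons]
  | succ k ih =>
    have hk' : k < P.length := by omega
    obtain ⟨hA, hne, hbd⟩ := ih hk'
    have hsplit : PySem.List.pyRange 1 (1 + ((k + 1 : Nat) : Int))
        = PySem.List.pyRange 1 (1 + (k : Int)) ++ [1 + (k : Int)] := by
      have h : (1 + ((k + 1 : Nat) : Int)) = (1 + (k : Int)) + 1 := by push_cast; ring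
      rw [h, PySem.List.pyRange_one_succ_right (by omega)]
    set cuts := (PySem.List.pyRange 1 (1 + (k : Int))).foldl (stepB_segment P md) [0] with hcuts
    have hkk : k + 1 < P.length := hk
    have hprev : PySem.List.pyGetD P (1 + (k : Int) - 1) ("", 0) = P[k] := by
      have h : (1 + (k : Int) - 1) = ((k : Nat) : Int) := by ring
      rw [h, PySem.List.pyGetD_natCast, List.getD_eq_getElem?_getD, List.getElem?_eq_getElem hk']
      rfl
    have hcurr : PySem.List.pyGetD P (1 + (k : Int)) ("", 0) = P[k + 1] := by
      have h : (1 + (k : Int)) = ((k + 1 : Nat) : Int) := by push_cast; ring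
      rw [h, PySem.List.pyGetD_natCast, List.getD_eq_getElem?_getD, List.getElem?_eq_getElem hkk]
      rfl
    rw [hsplit]
    simp only [List.foldl_append, List.foldl_cons, List.foldl_nil, ← hcuts, hA]
    by_cases hc : (P[k + 1].1 = P[k].1 ∧ P[k + 1].2 - P[k].2 ≤ md)
    · -- same region: B's cuts unchanged, A extends the last region
      have hsB : stepB_segment P md cuts (1 + (k : Int)) = cuts := by
        unfold stepB_segment
        rw [hprev, hcurr, if_neg]
        simp only [not_or, not_lt, ne_eq, not_not]
        exact ⟨hc.1, hc.2⟩
      set a := cuts.getLast hne with ha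
      have hamem := List.getLast_mem hne
      have habd := hbd a (by rw [ha]; exact hamem)
      have haN : a = ((a.toNat : Nat) : Int) := by omega
      have hslice : PySem.List.slice P (some a) (some (((k : Nat) + 1 + 1 : Nat) : Int))
          = PySem.List.slice P (some a) (some (((k : Nat) + 1 : Nat) : Int)) ++ [P[k + 1]] := by
        rw [haN]
        exact slice_succ_right P a.toNat (k + 1) (by omega) hkk
      have hsA : stepA_segment P md (mkSlices P (cuts ++ [(k : Int) + 1])) (1 + (k : Int))
          = mkSlices P cuts ++ [PySem.List.slice P (some a) (some ((k : Int) + 1)) ++ [P[k + 1]]] := by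
        unfold stepA_segment
        rw [hprev, hcurr, if_pos hc, mkSlices_append P cuts hne]
        simp [PySem.List.pyGetD_neg_one_append_singleton, ha]
      refine ⟨?_, by rw [hsB]; exact hne, ?_⟩
      · rw [hsA, hsB, mkSlices_append P cuts hne, ← ha]
        have e1 : (((k + 1 : Nat) : Int) + 1) = (((k : Nat) + 1 + 1 : Nat) : Int) := by push_cast; ring
        have e2 : ((k : Int) + 1) = (((k : Nat) + 1 : Nat) : Int) := by push_cast; ring
        rw [e1, e2, hslice]
      · intro x hx
        rw [hsB] at hx
        have := hbd x hx
        constructor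
        · exact this.1
        · have : x ≤ (k : Int) := this.2
          push_cast
          omega
    · -- new region: B appends cut k+1, A starts a new region
      have hsB : stepB_segment P md cuts (1 + (k : Int)) = cuts ++ [1 + (k : Int)] := by
        unfold stepB_segment
        rw [hprev, hcurr, if_pos]
        rcases not_and_or.mp hc with h | h
        · exact Or.inl h
        · exact Or.inr (not_le.mp h)
      have hsA : stepA_segment P md (mkSlices P (cuts ++ [(k : Int) + 1])) (1 + (k : Int))
          = mkSlices P (cuts ++ [(k : Int) + 1]) ++ [[P[k + 1]]] := by
        unfold stepA_segment
        rw [hprev, hcurr, if_neg hc]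
      refine ⟨?_, by rw [hsB]; simp, ?_⟩
      · rw [hsA, hsB]
        have hcomm : (1 : Int) + (k : Int) = (k : Int) + 1 := by ring
        rw [hcomm]
        have hgl : ((cuts ++ [(k : Int) + 1]).getLast (by simp)) = (k : Int) + 1 := by
          simp
        rw [mkSlices_append P (cuts ++ [(k : Int) + 1]) (by simp) _]
        rw [hgl]
        have e2 : ((k : Int) + 1) = (((k : Nat) + 1 : Nat) : Int) := by push_cast; ring
        have e1 : (((k + 1 : Nat) : Int) + 1) = ((((k : Nat) + 1) + 1 : Nat) : Int) := by push_cast; ring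
        rw [e1, e2, slice_singleton P (k + 1) hkk]
      · intro x hx
        rw [hsB] at hx
        rcases List.mem_append.mp hx with h | h
        · have := hbd x h
          push_cast
          omega
        · simp at h
          push_cast
          omega

-- B's comprehension over adjacent cut pairs computes mkSlices
theorem adjN (P : List (String × Int)) (cuts : List Int) :
    (List.range (cuts.length - 1)).map
      (fun k => PySem.List.slice P (some (cuts.getD k 0)) (some (cuts.getD (k + 1) 0)))
      = mkSlices P cuts := by
  induction cuts with
  | nil => simp [mkSlices]
  | cons a tl ih =>
    cases tl with
    | nil => simp [mkSlices]
    | cons b rest =>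
      have hlen : (a :: b :: rest : List Int).length - 1 = ((b :: rest : List Int).length - 1) + 1 := by
        simp
      rw [hlen, List.range_succ_eq_map, List.map_cons, List.map_map]
      show (PySem.List.slice P (some a) (some b))
            :: (List.range ((b :: rest : List Int).length - 1)).map
                (fun k => PySem.List.slice P (some ((a :: b :: rest).getD (Nat.succ k) 0))
                                             (some ((a :: b :: rest).getD (Nat.succ k + 1) 0)))
          = mkSlices P (a :: b :: rest)
      have hf : ∀ k : Nat, (a :: b :: rest : List Int).getD (Nat.succ k) 0 = (b :: rest : List Int).getD k 0 := by
        intro k; simp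
      show _ = PySem.List.slice P (some a) (some b) :: mkSlices P (b :: rest)
      refine congrArg _ ?_
      rw [← ih]
      apply List.map_congr_left
      intro k _
      rw [hf k, show Nat.succ k + 1 = Nat.succ (k + 1) from rfl, hf (k + 1)]

theorem adj (P : List (String × Int)) (cuts : List Int) :
    (PySem.List.pyRange 0 ((cuts.length : Int) - 1)).map
      (fun j => PySem.List.slice P (some (PySem.List.pyGetD cuts j 0))
                                    (some (PySem.List.pyGetD cuts (j + 1) 0)))
      = mkSlices P cuts := by
  rw [PySem.List.pyRange_one, List.map_map]
  have hlen : (((cuts.length : Int) - 1) - 0).toNat = cuts.length - 1 := by omega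
  rw [hlen, ← adjN P cuts]
  apply List.map_congr_left
  intro k _
  have e1 : (0 : Int) + (k : Nat) = ((k : Nat) : Int) := by ring
  have e2 : (0 : Int) + (k : Nat) + 1 = (((k + 1 : Nat)) : Int) := by push_cast; ring
  simp only [Function.comp_apply]
  rw [e1]
  have e3 : ((k : Nat) : Int) + 1 = (((k + 1 : Nat)) : Int) := by push_cast; ring
  rw [e3, PySem.List.pyGetD_natCast, PySem.List.pyGetD_natCast]

-- ===== VERDICT (by name: the statement is the Claim_ definition above) =====
theorem segment_cpgs_py_spec : Claim_equal_segment_cpgs_py := by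
  intro positions md _
  unfold Spec_segment_cpgs_py segment_cpgs_py segment_cpgs_py_alt
  by_cases hP : positions = []
  · simp [hP]
  · rw [if_neg hP, if_neg hP]
    have hlen : 0 < positions.length := List.length_pos_iff.mpr hP
    obtain ⟨hA, hne, _⟩ := segment_inv positions md hP (positions.length - 1) (by omega)
    have e : (1 + ((positions.length - 1 : Nat) : Int)) = (positions.length : Int) := by omega
    have e2 : (((positions.length - 1 : Nat) : Int) + 1) = (positions.length : Int) := by omega
    rw [e, e2] at hA
    dsimp only
    rw [hA, ← adj positions _]
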